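-- pv_equiv track=rewrite | github.com/ArtHenLed/pescaria | gerar_pescaria.py | seta_vento
-- ===== SOURCE A (Python) =====
-- def seta_vento(angulo):
--     """Retorna um emoji de seta direcional com base no ângulo do vento."""
--     if angulo is None:
--         return ""
--     direcoes = [(0, "⬇️"), (45, "↙️"), (90, "⬅️"), (135, "↖️"), (180, "⬆️"),
--                 (225, "↗️"), (270, "➡️"), (315, "↘️"), (360, "⬇️")]
--     for i in range(len(direcoes) - 1):
--         if direcoes[i][0] <= angulo < direcoes[i + 1][0]:
--             return direcoes[i][1]
--     return ""
-- ===== SOURCE B (Python) =====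
-- def seta_vento(angulo):
--     """Retorna um emoji de seta direcional com base no angulo do vento."""
--     if angulo is None or not (0 <= angulo < 360):
--         return ""
--     setas = ["⬇️", "↙️", "⬅️", "↖️", "⬆️", "↗️", "➡️", "↘️"]
--     return setas[int(angulo // 45)]
-- ===== Notes on version B (the rewrite author's own statement) =====
-- stated objective: simpler
-- what changed: Replaces the linear scan over threshold pairs with a range guard and a direct arithmetic bucket index angulo // 45 into an 8-element arrow table.
import Mathlib
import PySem

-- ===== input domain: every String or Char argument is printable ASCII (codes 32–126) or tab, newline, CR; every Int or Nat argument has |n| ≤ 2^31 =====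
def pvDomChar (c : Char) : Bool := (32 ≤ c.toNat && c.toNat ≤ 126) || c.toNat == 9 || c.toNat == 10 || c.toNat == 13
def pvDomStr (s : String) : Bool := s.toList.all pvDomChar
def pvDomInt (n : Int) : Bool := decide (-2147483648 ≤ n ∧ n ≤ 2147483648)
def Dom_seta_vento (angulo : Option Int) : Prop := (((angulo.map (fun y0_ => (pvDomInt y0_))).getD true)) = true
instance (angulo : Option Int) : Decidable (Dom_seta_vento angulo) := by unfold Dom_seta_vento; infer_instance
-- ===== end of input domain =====

-- B replaces the 8-step linear threshold scan with a range guard and a direct angulo // 45 table index (simpler).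


-- ===== PORT A =====
-- the for-loop over i in range(len(direcoes)-1): checks adjacent threshold pairs in order
def setaScan (a : Int) : List (Int × String) → String
  | (t1, s) :: rest@((t2, _) :: _) =>
      if t1 ≤ a ∧ a < t2 then s else setaScan a rest
  | _ => ""

def seta_vento (angulo : Option Int) : String :=
  match angulo with
  | none => ""
  | some a =>
      let direcoes : List (Int × String) :=
        [(0, "⬇️"), (45, "↙️"), (90, "⬅️"), (135, "↖️"), (180, "⬆️"),
         (225, "↗️"), (270, "➡️"), (315, "↘️"), (360, "⬇️")]
      setaScan a direcoes

-- ===== PORT B =====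
def seta_vento_alt (angulo : Option Int) : String :=
  match angulo with
  | none => ""
  | some a =>
      if 0 ≤ a ∧ a < 360 then
        let setas : List String := ["⬇️", "↙️", "⬅️", "↖️", "⬆️", "↗️", "➡️", "↘️"]
        -- setas[angulo // 45]: the guard keeps the index in range, so pyGet? is some
        (PySem.List.pyGet? setas (PySem.Int.floordiv a 45)).getD ""
      else ""

-- ===== PRECONDITION & SPEC =====
def Spec_seta_vento (angulo : Option Int) (out : String) : Prop := out = seta_vento_alt angulo
instance (angulo : Option Int) (out : String) : Decidable (Spec_seta_vento angulo out) := by unfold Spec_seta_vento; infer_instance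

-- ===== CLAIM (what is proved, stated in full; the proofs are below) =====
def Claim_equal_seta_vento : Prop := ∀ (angulo : Option Int), Dom_seta_vento angulo → Spec_seta_vento angulo (seta_vento angulo)

-- ===== LEMMAS AND PROOFS =====

-- ===== VERDICT (by name: the statement is the Claim_ definition above) =====
theorem seta_vento_spec : Claim_equal_seta_vento := by
  intro angulo _
  unfold Spec_seta_vento
  match angulo with
  | none => rfl
  | some a =>
    show setaScan a _ = _
    by_cases h0 : 0 ≤ a ∧ a < 45
    · have hf : PySem.Int.floordiv a 45 = 0 := by
        rw [PySem.Int.floordiv_eq_iff_of_pos (by omega)]; omega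
      simp only [setaScan, seta_vento_alt, hf, PySem.List.pyGet?, PySem.List.pyIdx?]
      norm_num
      split_ifs <;> first | rfl | omega
    · by_cases h1 : 45 ≤ a ∧ a < 90
      · have hf : PySem.Int.floordiv a 45 = 1 := by
          rw [PySem.Int.floordiv_eq_iff_of_pos (by omega)]; omega
        simp only [setaScan, seta_vento_alt, hf, PySem.List.pyGet?, PySem.List.pyIdx?]
        norm_num
        split_ifs <;> first | rfl | omega
      · by_cases h2 : 90 ≤ a ∧ a < 135
        · have hf : PySem.Int.floordiv a 45 = 2 := by
            rw [PySem.Int.floordiv_eq_iff_of_pos (by omega)]; omega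
          simp only [setaScan, seta_vento_alt, hf, PySem.List.pyGet?, PySem.List.pyIdx?]
          norm_num
          split_ifs <;> first | rfl | omega
        · by_cases h3 : 135 ≤ a ∧ a < 180
          · have hf : PySem.Int.floordiv a 45 = 3 := by
              rw [PySem.Int.floordiv_eq_iff_of_pos (by omega)]; omega
            simp only [setaScan, seta_vento_alt, hf, PySem.List.pyGet?, PySem.List.pyIdx?]
            norm_num
            split_ifs <;> first | rfl | omega
          · by_cases h4 : 180 ≤ a ∧ a < 225
            · have hf : PySem.Int.floordiv a 45 = 4 := by
                rw [PySem.Int.floordiv_eq_iff_of_pos (by omega)]; omega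
              simp only [setaScan, seta_vento_alt, hf, PySem.List.pyGet?, PySem.List.pyIdx?]
              norm_num
              split_ifs <;> first | rfl | omega
            · by_cases h5 : 225 ≤ a ∧ a < 270
              · have hf : PySem.Int.floordiv a 45 = 5 := by
                  rw [PySem.Int.floordiv_eq_iff_of_pos (by omega)]; omega
                simp only [setaScan, seta_vento_alt, hf, PySem.List.pyGet?, PySem.List.pyIdx?]
                norm_num
                split_ifs <;> first | rfl | omega
              · by_cases h6 : 270 ≤ a ∧ a < 315
                · have hf : PySem.Int.floordiv a 45 = 6 := by
                    rw [PySem.Int.floordiv_eq_iff_of_pos (by omega)]; omega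
                  simp only [setaScan, seta_vento_alt, hf, PySem.List.pyGet?, PySem.List.pyIdx?]
                  norm_num
                  split_ifs <;> first | rfl | omega
                · by_cases h7 : 315 ≤ a ∧ a < 360
                  · have hf : PySem.Int.floordiv a 45 = 7 := by
                      rw [PySem.Int.floordiv_eq_iff_of_pos (by omega)]; omega
                    simp only [setaScan, seta_vento_alt, hf, PySem.List.pyGet?, PySem.List.pyIdx?]
                    norm_num
                    split_ifs <;> first | rfl | omega
                  · simp only [setaScan, seta_vento_alt, PySem.List.pyGet?, PySem.List.pyIdx?]
                    norm_num
                    split_ifs <;> first | rfl | omega
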